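-- pv_equiv track=rewrite | github.com/Aasthaengg/IBMdataset | Python_codes/p03148/s478464328.py | solve
-- ===== SOURCE A (Python) =====
-- from collections import Counter
--
-- def solve(N, K, sushi):
--     sushi.sort(key=lambda x: x[1], reverse=True)
--     pick = sushi[:K]            #  おいしさポイントの高い方からK個の寿司を選択
--     pick_type = set([t for t, d in pick]) # 選択済の種類
--
--     cnt = Counter()             #  各種類の寿司が何個ずつあるか覚えておく
--     for t, d in pick:
--         cnt[t] += 1
--
--     rem = dict()                #  未選択の種類の寿司のうち、一番おいしさポイントが高い物
--     for t, d in sushi: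
--         if t not in pick_type:
--             rem[t] = max(rem.get(t, 0), d)
--     res = sorted([[k, v] for k, v in rem.items()], key=lambda x: x[1]) # おいしさで昇順にソート(一番おいしい物が末尾)
--
--     manzoku = sum([d for t, d in pick])
--     ans = [manzoku + len(pick_type)**2] #  現在の選択でのスコア、ここから種類を1つずつ増加させていきスコアを計算する
--     while len(pick_type) < K and pick and res:
--         t, d = res.pop()
--         pick_type.add(t)
--         tt, dd = pick.pop()
--         while cnt[tt] == 1 and pick:
--             tt, dd = pick.pop()
--         if cnt[tt] > 1:
--             cnt[tt] -= 1
--             manzoku = manzoku - dd + d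
--             ans.append(manzoku+ len(pick_type)**2)
--     return max(ans)
-- ===== SOURCE B (Python) =====
-- def solve(N, K, sushi):
--     # The greedy swap loop of A collapses to a closed formula: the j-th swap always trades the
--     # j-th smallest duplicate in the top-K for the j-th best unused-type value, so the answer is
--     # a max over j of two prefix sums plus (t0+j)**2.  Sorts sushi in place like A.
--     sushi.sort(key=lambda x: x[1], reverse=True)
--     pick = sushi[:K]
--     seen = set()
--     dups = []                      # deliciousness of non-first occurrences in pick (descending)
--     for t, d in pick:
--         if t in seen:
--             dups.append(d)
--         else:
--             seen.add(t)
--     rem = {}                       # best value of each type not represented in pick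
--     for t, d in sushi:
--         if t not in seen:
--             rem[t] = max(rem.get(t, 0), d)
--     gains = sorted(rem.values(), reverse=True)
--     t0 = len(seen)
--     base = sum(d for t, d in pick)
--     drop = [0]                     # prefix sums of the duplicates, smallest first
--     s = 0
--     for d in reversed(dups):
--         s += d
--         drop.append(s)
--     add = [0]                      # prefix sums of the gains, largest first
--     s = 0
--     for d in gains:
--         s += d
--         add.append(s)
--     J = min(len(dups), len(gains), max(K - t0, 0))
--     return max(base - drop[j] + add[j] + (t0 + j) ** 2 for j in range(J + 1))
-- ===== Notes on version B (the rewrite author's own statement) =====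
-- stated objective: alternative
-- what changed: B eliminates A's greedy simulation (Counter bookkeeping, popping picked sushi with an inner skip-while, a growing score list) entirely: it observes that the j-th swap always trades the j-th smallest duplicate in the top-K for the j-th best unused-type value, builds two prefix-sum arrays, and returns a closed-form max over j of base - drop[j] + add[j] + (t0+j)^2; both sort sushi in place.
import Mathlib
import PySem

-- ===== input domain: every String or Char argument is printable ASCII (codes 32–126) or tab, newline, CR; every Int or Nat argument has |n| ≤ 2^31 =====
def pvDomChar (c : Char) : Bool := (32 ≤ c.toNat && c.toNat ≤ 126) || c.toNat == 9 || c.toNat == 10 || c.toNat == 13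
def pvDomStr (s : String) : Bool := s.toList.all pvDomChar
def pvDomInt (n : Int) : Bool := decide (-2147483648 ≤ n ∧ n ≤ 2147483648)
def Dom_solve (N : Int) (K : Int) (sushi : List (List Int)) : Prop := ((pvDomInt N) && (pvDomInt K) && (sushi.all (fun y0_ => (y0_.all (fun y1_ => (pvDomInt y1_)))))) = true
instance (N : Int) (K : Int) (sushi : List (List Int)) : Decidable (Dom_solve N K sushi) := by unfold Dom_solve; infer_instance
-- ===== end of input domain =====

-- B replaces A's greedy simulation (Counter bookkeeping, popping picked sushi with an inner
-- skip-while, a growing score list) by a closed-form max over j of two prefix-sum arrays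
-- (objective: alternative algorithm, same O(n log n) cost).
-- Both Pythons sort `sushi` in place (same mutation); the equivalence proved here is about the return value.

-- x[0] (sushi type) and x[1] (deliciousness) of a row; exact for rows of length 2 (Pre_solve)
def pvTy (x : List Int) : Int := PySem.List.pyGetD x 0 0
def pvKey (x : List Int) : Int := PySem.List.pyGetD x 1 0

-- ===== PORT A =====
-- `tt, dd = pick.pop(); while cnt[tt] == 1 and pick: tt, dd = pick.pop()` — pick is kept reversed
-- (Python pops at the right end; here the stack head is Python's last element).  The [] case is
-- unreachable: the loop guard ensures pick is nonempty.
def skipA (cnt : PySem.Dict Int Int) : List (List Int) → List Int × List (List Int)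
  | [] => ([], [])
  | x :: rest => if cnt.getD (pvTy x) 0 = 1 ∧ rest ≠ [] then skipA cnt rest else (x, rest)

-- the `while len(pick_type) < K and pick and res:` loop; `revPick`/`revRes` are Python's pick/res
-- reversed (pop() = head), `ans` is the accumulated list of scores
def loopA (K : Int) (ptype : PySem.Set Int) (cnt : PySem.Dict Int Int) (revPick : List (List Int))
    (revRes : List (List Int)) (manzoku : Int) (ans : List Int) : List Int :=
  match revRes with
  | [] => ans
  | r :: res' =>
    if (ptype.length : Int) < K ∧ revPick ≠ [] then
      let d := pvKey r
      let ptype' := PySem.Set.add ptype (pvTy r)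
      let p := skipA cnt revPick
      if 1 < cnt.getD (pvTy p.1) 0 then
        loopA K ptype' (cnt.modify (pvTy p.1) 0 (· - 1)) p.2 res' (manzoku - pvKey p.1 + d)
          (ans ++ [manzoku - pvKey p.1 + d + ((ptype'.length : Int)) ^ 2])
      else loopA K ptype' cnt p.2 res' manzoku ans
    else ans

def solve (N : Int) (K : Int) (sushi : List (List Int)) : Int :=
  let ss := PySem.List.sorted sushi pvKey true
  let pick := PySem.List.slice ss none (some K)
  let pick_type := PySem.Set.ofList (pick.map pvTy)
  let cnt := pick.foldl (fun d x => d.modify (pvTy x) 0 (· + 1)) PySem.Dict.empty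
  let rem := ss.foldl (fun r x =>
    if PySem.Set.contains pick_type (pvTy x) then r
    else r.insert (pvTy x) (max (r.getD (pvTy x) 0) (pvKey x))) PySem.Dict.empty
  let res := PySem.List.sorted (rem.items.map (fun kv => [kv.1, kv.2])) pvKey false
  let manzoku := (pick.map pvKey).sum
  let ans := loopA K pick_type cnt pick.reverse res.reverse manzoku
    [manzoku + ((pick_type.length : Int)) ^ 2]
  (PySem.List.max? ans (fun y => y)).getD 0

-- ===== PORT B =====
-- one pass over pick: (seen types, deliciousness of the duplicates in pick order);
-- then the two prefix-sum lists drop/add ((list, running sum) state) and the closed-form max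
def solve_alt (N : Int) (K : Int) (sushi : List (List Int)) : Int :=
  let ss := PySem.List.sorted sushi pvKey true
  let pick := PySem.List.slice ss none (some K)
  let p := pick.foldl (fun (q : PySem.Set Int × List Int) x =>
    if PySem.Set.contains q.1 (pvTy x) then (q.1, q.2 ++ [pvKey x])
    else (PySem.Set.add q.1 (pvTy x), q.2)) (PySem.Set.empty, [])
  let rem := ss.foldl (fun r x =>
    if PySem.Set.contains p.1 (pvTy x) then r
    else r.insert (pvTy x) (max (r.getD (pvTy x) 0) (pvKey x))) PySem.Dict.empty
  let gains := PySem.List.sorted rem.values (fun v => v) true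
  let t0 : Int := (p.1.length : Int)
  let base := (pick.map pvKey).sum
  let dr := p.2.reverse.foldl (fun (st : List Int × Int) d => (st.1 ++ [st.2 + d], st.2 + d)) ([(0:Int)], (0:Int))
  let ad := gains.foldl (fun (st : List Int × Int) d => (st.1 ++ [st.2 + d], st.2 + d)) ([(0:Int)], (0:Int))
  let J := min (min ((p.2.length : Int)) ((gains.length : Int))) (max (K - t0) 0)
  (PySem.List.max? ((PySem.List.pyRange 0 (J+1) 1).map (fun j =>
      base - PySem.List.pyGetD dr.1 j 0 + PySem.List.pyGetD ad.1 j 0 + (t0 + j)^2)) (fun y => y)).getD 0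

-- ===== PRECONDITION & SPEC =====
-- Pre_ excludes exactly the inputs where Python raises: a row of length ≠ 2 makes `for t, d in …`
-- raise ValueError (both A and B raise there).
def Pre_solve (N : Int) (K : Int) (sushi : List (List Int)) : Prop :=
  ∀ row ∈ sushi, row.length = 2
instance (N : Int) (K : Int) (sushi : List (List Int)) : Decidable (Pre_solve N K sushi) := by
  unfold Pre_solve; infer_instance

def pvWitness_solve : Int × Int × List (List Int) := (4, 2, [[1, 5], [1, 3], [2, 4], [3, 1]])

def Spec_solve (N : Int) (K : Int) (sushi : List (List Int)) (out : Int) : Prop := out = solve_alt N K sushi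
instance (N : Int) (K : Int) (sushi : List (List Int)) (out : Int) : Decidable (Spec_solve N K sushi out) := by unfold Spec_solve; infer_instance

-- ===== CLAIM (what is proved, stated in full; the proofs are below) =====
def Claim_equal_solve : Prop := ∀ (N : Int) (K : Int) (sushi : List (List Int)), Dom_solve N K sushi → Pre_solve N K sushi → Spec_solve N K sushi (solve N K sushi)

-- ===== LEMMAS AND PROOFS =====

-- proof-side intermediate: A's swap loop stripped of the skip-while — consume one gain and one
-- removable duplicate per step, keeping a running max
def loopB (K : Int) (vals : List Int) (stock : List Int) (base distinct best : Int) : Int :=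
  match vals with
  | [] => best
  | v :: vs =>
    if K ≤ distinct ∨ stock = [] then best
    else
      match stock with
      | [] => best
      | s :: st =>
        let base' := base + v - s
        let d' := distinct + 1
        let cand := base' + d' * d'
        loopB K vs st base' d' (if best < cand then cand else best)

-- proof-side intermediate: the list of candidate scores loopB folds max over
def candsB (K : Int) : List Int → List Int → Int → Int → List Int
  | v :: vs, s :: st, base, dist =>
    if dist < K then (base + v - s + (dist + 1) ^ 2) :: candsB K vs st (base + v - s) (dist + 1)
    else []
  | _, _, _, _ => []

-- elements of l whose type is in s or recurs later in l (A's removable duplicates, in reversed-pick order)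
def remsS (s : PySem.Set Int) : List (List Int) → List (List Int)
  | [] => []
  | x :: xs => if pvTy x ∈ xs.map pvTy ∨ pvTy x ∈ s then x :: remsS s xs else remsS s xs

def maxOf (l : List Int) : Int := (PySem.List.max? l (fun y => y)).getD 0

def InvCnt (cnt : PySem.Dict Int Int) (l : List (List Int)) : Prop :=
  ∀ k ∈ l.map pvTy, cnt.getD k 0 = ((l.map pvTy).count k : Int)

theorem maxOf_singleton (a : Int) : maxOf [a] = a := by
  simp [maxOf, PySem.List.max?_id_cons]

theorem maxOf_append_singleton (a : Int) (t : List Int) (w : Int) :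
    maxOf ((a :: t) ++ [w]) = max (maxOf (a :: t)) w := by
  simp [maxOf, PySem.List.max?_id_cons, List.foldl_append]

theorem max_eq_if (a b : Int) : max a b = if a < b then b else a := by
  split_ifs with h
  · exact max_eq_right h.le
  · exact max_eq_left (not_lt.1 h)

theorem remsS_append_singleton (s : PySem.Set Int) (ys : List (List Int)) (x : List Int) :
    remsS s (ys ++ [x]) =
      remsS (PySem.Set.add s (pvTy x)) ys ++ (if pvTy x ∈ s then [x] else []) := by
  induction ys with
  | nil => simp [remsS]
  | cons y ys ih =>
    have hiff : (pvTy y ∈ List.map pvTy (ys ++ [x]) ∨ pvTy y ∈ s) ↔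
        (pvTy y ∈ List.map pvTy ys ∨ pvTy y ∈ PySem.Set.add s (pvTy x)) := by
      simp only [List.map_append, List.mem_append, List.map_cons, List.mem_cons,
        PySem.Set.mem_add, List.map_nil]
      constructor
      · rintro (h | h) <;> tauto
      · rintro (h | h | h) <;> tauto
    simp only [List.cons_append, remsS, ih]
    by_cases h : pvTy y ∈ List.map pvTy ys ∨ pvTy y ∈ PySem.Set.add s (pvTy x)
    · rw [if_pos (hiff.2 h), if_pos h, List.cons_append]
    · rw [if_neg (fun hc => h (hiff.1 hc)), if_neg h]

theorem skipA_of_remsS_nil (cnt : PySem.Dict Int Int) (l : List (List Int))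
    (hI : InvCnt cnt l) (hne : l ≠ []) (hr : remsS PySem.Set.empty l = []) :
    ∃ x, skipA cnt l = (x, []) ∧ cnt.getD (pvTy x) 0 = 1 := by
  induction l with
  | nil => exact absurd rfl hne
  | cons x xs ih =>
    have hd : pvTy x ∉ xs.map pvTy := by
      intro hm
      simp [remsS, hm] at hr
    have hrest : remsS PySem.Set.empty xs = [] := by
      simpa [remsS, hd, PySem.Set.empty] using hr
    have hget : cnt.getD (pvTy x) 0 = 1 := by
      rw [hI (pvTy x) (by simp)]
      simp [List.count_cons_self, List.count_eq_zero_of_not_mem hd]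
    cases xs with
    | nil => exact ⟨x, by simp [skipA, hget], hget⟩
    | cons y ys =>
      have hI' : InvCnt cnt (y :: ys) := by
        intro k hk
        have hkx : pvTy x ≠ k := fun h => hd (h ▸ hk)
        rw [hI k (by simp at hk ⊢; tauto)]
        simp [List.count_cons, hkx]
      obtain ⟨z, hz, hz1⟩ := ih hI' (by simp) hrest
      refine ⟨z, ?_, hz1⟩
      rw [skipA, if_pos ⟨hget, by simp⟩]
      exact hz

theorem skipA_of_remsS_cons (cnt : PySem.Dict Int Int) (l : List (List Int))
    (r : List Int) (rs : List (List Int))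
    (hI : InvCnt cnt l) (hr : remsS PySem.Set.empty l = r :: rs) :
    ∃ v, skipA cnt l = (r, v) ∧ remsS PySem.Set.empty v = rs ∧
      1 < cnt.getD (pvTy r) 0 ∧ InvCnt (cnt.modify (pvTy r) 0 (· - 1)) v := by
  induction l with
  | nil => simp [remsS] at hr
  | cons x xs ih =>
    by_cases hd : pvTy x ∈ xs.map pvTy
    · rw [remsS, if_pos (Or.inl hd)] at hr
      injection hr with hx1 hx2
      subst hx1
      have hcnt : cnt.getD (pvTy x) 0 = (((x :: xs).map pvTy).count (pvTy x) : Int) :=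
        hI (pvTy x) (by simp)
      have h1 : 1 ≤ (xs.map pvTy).count (pvTy x) := List.one_le_count_iff.2 hd
      have h2 : ((x :: xs).map pvTy).count (pvTy x) = (xs.map pvTy).count (pvTy x) + 1 := by
        simp [List.count_cons_self]
      have hge : 1 < cnt.getD (pvTy x) 0 := by
        rw [hcnt, h2]; push_cast; omega
      refine ⟨xs, ?_, hx2, hge, ?_⟩
      · rw [skipA, if_neg]
        rintro ⟨hc, -⟩
        rw [hc] at hge; omega
      · intro k hk
        rw [PySem.Dict.getD_modify]
        by_cases hkx : k = pvTy x
        · subst hkx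
          rw [if_pos rfl, hcnt, h2]; push_cast; omega
        · rw [if_neg hkx, hI k (by simp at hk ⊢; tauto)]
          have hxk : pvTy x ≠ k := fun h => hkx h.symm
          simp [List.count_cons, hxk]
    · have hrest : remsS PySem.Set.empty xs = r :: rs := by
        simpa [remsS, hd, PySem.Set.empty] using hr
      have hxs : xs ≠ [] := by
        rintro rfl; simp [remsS] at hrest
      have hcount : cnt.getD (pvTy x) 0 = 1 := by
        rw [hI (pvTy x) (by simp)]
        simp [List.count_cons_self, List.count_eq_zero_of_not_mem hd]
      have hI' : InvCnt cnt xs := by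
        intro k hk
        have hkx : pvTy x ≠ k := fun h => hd (h ▸ hk)
        rw [hI k (by simp at hk ⊢; tauto)]
        simp [List.count_cons, hkx]
      obtain ⟨v, hv, hv2, hv3, hv4⟩ := ih hI' hrest
      refine ⟨v, ?_, hv2, hv3, hv4⟩
      rw [skipA, if_pos ⟨hcount, hxs⟩]
      exact hv

theorem loopB_stock_nil (K : Int) (vals : List Int) (base dist best : Int) :
    loopB K vals [] base dist best = best := by
  cases vals <;> simp [loopB]

theorem loop_main (K : Int) (revRes : List (List Int)) : ∀ (revPick : List (List Int))
    (cnt : PySem.Dict Int Int) (ptype : PySem.Set Int) (manzoku a : Int) (ans : List Int),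
    InvCnt cnt revPick →
    (revRes.map pvTy).Nodup →
    (∀ k ∈ revRes.map pvTy, k ∉ ptype) →
    maxOf (loopA K ptype cnt revPick revRes manzoku (a :: ans)) =
      loopB K (revRes.map pvKey) ((remsS PySem.Set.empty revPick).map pvKey) manzoku
        (ptype.length : Int) (maxOf (a :: ans)) := by
  induction revRes with
  | nil => intro revPick cnt ptype manzoku a ans _ _ _; simp [loopA, loopB]
  | cons r res' ih =>
    intro revPick cnt ptype manzoku a ans hI hnd hfresh
    have hndr : (res'.map pvTy).Nodup := (List.nodup_cons.1 (by simpa using hnd)).2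
    have hrfresh : pvTy r ∉ ptype := hfresh (pvTy r) (by simp)
    by_cases hK : (ptype.length : Int) < K
    · by_cases hP : revPick ≠ []
      · have hadd : PySem.Set.add ptype (pvTy r) = ptype ++ [pvTy r] :=
          PySem.Set.add_of_not_mem hrfresh
        have hlen : ((PySem.Set.add ptype (pvTy r)).length : Int) = (ptype.length : Int) + 1 := by
          rw [hadd]; simp
        have hfresh' : ∀ k ∈ res'.map pvTy, k ∉ PySem.Set.add ptype (pvTy r) := by
          intro k hk hmem
          rcases (PySem.Set.mem_add ptype (pvTy r) k).1 hmem with h | h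
          · exact hfresh k (by simp [hk]) h
          · subst h
            exact (List.nodup_cons.1 (by simpa using hnd)).1 hk
        rcases hrem : remsS PySem.Set.empty revPick with _ | ⟨q, qs⟩
        · -- no removable duplicate left: A pops everything fruitlessly, B breaks
          obtain ⟨x, hx, hx1⟩ := skipA_of_remsS_nil cnt revPick hI hP hrem
          rw [loopA]
          rw [if_pos ⟨hK, hP⟩]
          simp only [hx]
          rw [if_neg (by rw [hx1]; omega)]
          have := ih [] cnt (PySem.Set.add ptype (pvTy r)) manzoku a ans
            (by intro k hk; simp at hk) hndr hfresh'
          rw [this]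
          simp [remsS, loopB_stock_nil]
        · -- swap the cheapest removable duplicate for the best new type
          obtain ⟨v, hv, hv2, hv3, hv4⟩ := skipA_of_remsS_cons cnt revPick q qs hI hrem
          rw [loopA]
          rw [if_pos ⟨hK, hP⟩]
          simp only [hv]
          rw [if_pos hv3]
          have := ih v (cnt.modify (pvTy q) 0 (· - 1)) (PySem.Set.add ptype (pvTy r))
            (manzoku - pvKey q + pvKey r) a (ans ++ [manzoku - pvKey q + pvKey r +
              ((PySem.Set.add ptype (pvTy r)).length : Int) ^ 2]) hv4 hndr hfresh'
          rw [← List.cons_append] at this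
          rw [this, hv2]
          rw [List.map_cons, List.map_cons, loopB]
          rw [if_neg (by rw [not_or]; exact ⟨by omega, by simp⟩)]
          rw [maxOf_append_singleton, hlen]
          have harith : manzoku - pvKey q + pvKey r = manzoku + pvKey r - pvKey q := by ring
          have hsq : ((ptype.length : Int) + 1) ^ 2 =
              ((ptype.length : Int) + 1) * ((ptype.length : Int) + 1) := sq _
          rw [harith, hsq, max_eq_if]
      · rw [not_not] at hP
        subst hP
        rw [loopA, if_neg (by simp)]
        rw [remsS]
        simp [loopB_stock_nil]
    · rw [loopA, if_neg (by tauto)]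
      have hKle : K ≤ (ptype.length : Int) := by omega
      simp [loopB, hKle]

-- B's seen/dups pass: seen = set of types, dups = removable duplicates in pick order
-- (so dups.reverse is A's removable-duplicate stack, smallest first)
theorem fold_seen_dups : ∀ (l : List (List Int)) (s : PySem.Set Int) (st : List Int),
    l.foldl (fun (q : PySem.Set Int × List Int) x =>
      if PySem.Set.contains q.1 (pvTy x) then (q.1, q.2 ++ [pvKey x])
      else (PySem.Set.add q.1 (pvTy x), q.2)) (s, st) =
    (PySem.Set.update s (l.map pvTy), st ++ ((remsS s l.reverse).map pvKey).reverse) := by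
  intro l
  induction l with
  | nil => intro s st; simp [remsS, PySem.Set.update_nil]
  | cons x xs ih =>
    intro s st
    by_cases hm : pvTy x ∈ s
    · rw [List.foldl_cons]
      rw [if_pos ((PySem.Set.contains_iff s (pvTy x)).2 hm)]
      rw [ih]
      rw [List.map_cons, PySem.Set.update_cons, PySem.Set.add_of_mem hm]
      rw [List.reverse_cons, remsS_append_singleton, PySem.Set.add_of_mem hm, if_pos hm]
      simp
    · rw [List.foldl_cons]
      rw [if_neg (fun hc => hm ((PySem.Set.contains_iff s (pvTy x)).1 hc))]
      rw [ih]
      rw [List.map_cons, PySem.Set.update_cons]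
      rw [List.reverse_cons, remsS_append_singleton, if_neg hm]
      simp

theorem values_pairs (rem : PySem.Dict Int Int) :
    (rem.items.map (fun kv => [kv.1, kv.2])).map pvKey = rem.values := by
  rw [List.map_map]; rfl

theorem keys_pairs (rem : PySem.Dict Int Int) :
    (rem.items.map (fun kv => [kv.1, kv.2])).map pvTy = rem.keys := by
  rw [List.map_map]; rfl

theorem sorted_map_key (xs : List (List Int)) :
    (PySem.List.sorted xs pvKey false).map pvKey
      = PySem.List.sorted (xs.map pvKey) (fun v => v) false := by
  refine List.Perm.eq_of_pairwise (fun a b _ _ h1 h2 => le_antisymm h1 h2) ?_ ?_ ?_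
  · exact PySem.List.sorted_map_key_pairwise xs pvKey
  · exact PySem.List.sorted_pairwise (xs.map pvKey) (fun v => v)
  · exact ((PySem.List.sorted_perm xs pvKey false).map pvKey).trans
      (PySem.List.sorted_perm (xs.map pvKey) (fun v => v) false).symm

theorem sorted_rev_reverse (ys : List Int) :
    PySem.List.sorted ys (fun v => v) true
      = (PySem.List.sorted ys (fun v => v) false).reverse := by
  refine List.Perm.eq_of_pairwise (le := fun a b => b ≤ a)
    (fun a b _ _ h1 h2 => le_antisymm h2 h1) ?_ ?_ ?_
  · exact PySem.List.sorted_pairwise_rev ys (fun v => v)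
  · exact List.pairwise_reverse.2 (PySem.List.sorted_pairwise ys (fun v => v))
  · exact (PySem.List.sorted_perm ys (fun v => v) true).trans
      ((PySem.List.sorted_perm ys (fun v => v) false).symm.trans
        (List.reverse_perm _).symm)

theorem cnt_inv (pick : List (List Int)) :
    InvCnt (pick.foldl (fun d x => d.modify (pvTy x) 0 (· + 1)) PySem.Dict.empty)
      pick.reverse := by
  intro k hk
  have h := PySem.Dict.getD_foldl_modify_add_one (pick.map pvTy) PySem.Dict.empty k
  simp only [List.foldl_map] at h
  rw [List.map_reverse, List.count_reverse, h]
  simp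

theorem rem_props (pt : PySem.Set Int) (l : List (List Int)) :
    ∀ (r : PySem.Dict Int Int), r.keys.Nodup →
      (l.foldl (fun r x => if PySem.Set.contains pt (pvTy x) then r
          else r.insert (pvTy x) (max (r.getD (pvTy x) 0) (pvKey x))) r).keys.Nodup ∧
      ∀ k ∈ (l.foldl (fun r x => if PySem.Set.contains pt (pvTy x) then r
          else r.insert (pvTy x) (max (r.getD (pvTy x) 0) (pvKey x))) r).keys,
        k ∈ r.keys ∨ k ∉ pt := by
  induction l with
  | nil => intro r h; exact ⟨h, fun k hk => Or.inl hk⟩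
  | cons x xs ih =>
    intro r h
    rw [List.foldl_cons]
    by_cases hc : PySem.Set.contains pt (pvTy x) = true
    · rw [if_pos hc]; exact ih r h
    · rw [if_neg hc]
      obtain ⟨h1, h2⟩ := ih (r.insert (pvTy x) (max (r.getD (pvTy x) 0) (pvKey x)))
        (PySem.Dict.nodup_keys_insert r _ _ h)
      refine ⟨h1, fun k hk => ?_⟩
      rcases h2 k hk with hmem | hnp
      · rcases (PySem.Dict.mem_keys_insert r _ k _).1 hmem with rfl | hm
        · exact Or.inr (fun hin => hc ((PySem.Set.contains_iff pt _).2 hin))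
        · exact Or.inl hm
      · exact Or.inr hnp

-- loopB is a running max over candsB
theorem loopB_eq_foldl_max (K : Int) (vals : List Int) : ∀ (stock : List Int) (base dist best : Int),
    loopB K vals stock base dist best = List.foldl max best (candsB K vals stock base dist) := by
  induction vals with
  | nil => intro stock base dist best; cases stock <;> simp [loopB, candsB]
  | cons v vs ih =>
    intro stock base dist best
    cases stock with
    | nil => simp [loopB, candsB]
    | cons s st =>
      by_cases hK : dist < K
      · rw [loopB, if_neg (by rw [not_or]; exact ⟨by omega, by simp⟩)]
        rw [candsB, if_pos hK, List.foldl_cons, ih, ← max_eq_if]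
        rw [show (base + v - s) + (dist + 1) * (dist + 1) = base + v - s + (dist + 1) ^ 2 by ring]
      · rw [loopB, if_pos (Or.inl (by omega)), candsB, if_neg hK, List.foldl_nil]

-- candsB written as an indexed map of prefix sums
theorem candsB_eq_map (K : Int) (vals : List Int) : ∀ (stock : List Int) (base dist : Int),
    candsB K vals stock base dist =
      (List.range (min (min vals.length stock.length) ((K - dist).toNat))).map
        (fun i => base + (vals.take (i + 1)).sum - (stock.take (i + 1)).sum
          + (dist + 1 + (i : Int)) ^ 2) := by
  induction vals with
  | nil => intro stock base dist; simp [candsB]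
  | cons v vs ih =>
    intro stock base dist
    cases stock with
    | nil => simp [candsB]
    | cons s st =>
      by_cases hK : dist < K
      · have hT : (K - dist).toNat = (K - (dist + 1)).toNat + 1 := by omega
        rw [candsB, if_pos hK, ih]
        rw [show min (min (v :: vs).length (s :: st).length) ((K - dist).toNat)
            = (min (min vs.length st.length) ((K - (dist + 1)).toNat)) + 1 by
          simp [hT]]
        rw [List.range_succ_eq_map, List.map_cons, List.map_map]
        congr 1
        · simp only [List.take_succ_cons, List.take_zero, List.sum_cons, List.sum_nil,
            Nat.cast_zero, add_zero]
        · refine List.map_congr_left fun i _ => ?_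
          simp only [Function.comp_apply, List.take_succ_cons, List.sum_cons]
          push_cast
          ring
      · have hT : (K - dist).toNat = 0 := by omega
        rw [candsB, if_neg hK, hT]
        simp

-- B's prefix-sum loop builds exactly the list of take-sums
theorem prefix_fold (l : List Int) : ∀ (acc : List Int) (s : Int),
    (l.foldl (fun (st : List Int × Int) d => (st.1 ++ [st.2 + d], st.2 + d)) (acc, s)).1
      = acc ++ (List.range l.length).map (fun i => s + (l.take (i + 1)).sum) := by
  induction l with
  | nil => intro acc s; simp
  | cons d l ih =>
    intro acc s
    rw [List.foldl_cons]
    show (List.foldl (fun (st : List Int × Int) d => (st.1 ++ [st.2 + d], st.2 + d))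
      (acc ++ [s + d], s + d) l).1 = _
    rw [ih]
    simp only [List.length_cons]
    rw [List.range_succ_eq_map, List.map_cons, List.map_map]
    simp only [List.append_assoc, List.singleton_append]
    congr 1
    congr 1
    · simp [List.take_succ_cons]
    · refine List.map_congr_left fun i _ => ?_
      simp only [Function.comp_apply, List.take_succ_cons, List.sum_cons]
      ring

theorem prefix_fold_getD (l : List Int) (k : Nat) (hk : k ≤ l.length) :
    ((l.foldl (fun (st : List Int × Int) d => (st.1 ++ [st.2 + d], st.2 + d))
      (([(0:Int)], (0:Int)))).1).getD k 0 = (l.take k).sum := by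
  rw [prefix_fold]
  cases k with
  | zero => simp
  | succ k =>
    rw [show ((0:Int) :: []) ++ (List.range l.length).map (fun i => 0 + (l.take (i + 1)).sum)
        = (0:Int) :: (List.range l.length).map (fun i => 0 + (l.take (i + 1)).sum) by simp]
    rw [List.getD_cons_succ]
    rw [List.getD_eq_getElem?_getD, List.getElem?_map, List.getElem?_range (by omega)]
    simp

theorem maxOf_cons (x : Int) (t : List Int) : maxOf (x :: t) = t.foldl max x := by
  simp [maxOf, PySem.List.max?_id_cons]

-- ===== VERDICT (by name: the statement is the Claim_ definition above) =====
theorem solve_spec : Claim_equal_solve := by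
  intro N K sushi _ _
  show solve N K sushi = solve_alt N K sushi
  unfold solve solve_alt
  generalize PySem.List.sorted sushi pvKey true = ss
  simp only [fold_seen_dups, List.nil_append]
  rw [show PySem.Set.update PySem.Set.empty ((PySem.List.slice ss none (some K)).map pvTy)
      = PySem.Set.ofList ((PySem.List.slice ss none (some K)).map pvTy) from
    PySem.Set.update_nil_left _]
  set pick := PySem.List.slice ss none (some K) with hpickdef
  set pt := PySem.Set.ofList (pick.map pvTy) with hptdef
  set stock := (remsS PySem.Set.empty pick.reverse).map pvKey with hstockdef
  rw [List.reverse_reverse]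
  set rem := ss.foldl (fun r x => if PySem.Set.contains pt (pvTy x) then r
    else r.insert (pvTy x) (max (r.getD (pvTy x) 0) (pvKey x))) PySem.Dict.empty with hremdef
  set res := PySem.List.sorted (rem.items.map (fun kv => [kv.1, kv.2])) pvKey false with hresdef
  obtain ⟨hndk, hfr⟩ := rem_props pt ss PySem.Dict.empty PySem.Dict.nodup_keys_empty
  rw [← hremdef] at hndk hfr
  have hfr' : ∀ k ∈ rem.keys, k ∉ pt := by
    intro k hk
    rcases hfr k hk with h | h
    · simp [PySem.Dict.keys_empty] at h
    · exact h
  have hperm : ((res.reverse).map pvTy).Perm rem.keys := by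
    rw [List.map_reverse]
    refine (List.reverse_perm _).trans ?_
    rw [hresdef]
    exact ((PySem.List.sorted_perm _ pvKey false).map pvTy).trans (by rw [keys_pairs])
  have hnd : ((res.reverse).map pvTy).Nodup := hperm.nodup_iff.2 hndk
  have hfresh : ∀ k ∈ (res.reverse).map pvTy, k ∉ pt := fun k hk => hfr' k (hperm.subset hk)
  have hvals : PySem.List.sorted rem.values (fun v => v) true = (res.reverse).map pvKey := by
    rw [List.map_reverse, hresdef, sorted_map_key, values_pairs, sorted_rev_reverse]
  rw [hvals]
  set vals := (res.reverse).map pvKey with hvalsdef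
  set base := (pick.map pvKey).sum with hbasedef
  -- A's side: collapse the greedy loop to a foldl max over the indexed candidate list
  have hA := loop_main K res.reverse pick.reverse
    (pick.foldl (fun d x => d.modify (pvTy x) 0 (· + 1)) PySem.Dict.empty) pt
    base (base + ((pt.length : Int)) ^ 2) []
    (cnt_inv pick) hnd hfresh
  rw [maxOf_singleton] at hA
  have hmax : ∀ l : List Int, (PySem.List.max? l (fun y => y)).getD 0 = maxOf l :=
    fun _ => rfl
  rw [hmax, hmax, hA, loopB_eq_foldl_max, candsB_eq_map]
  -- B's side: the pyRange over a natural range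
  set nJ := min (min vals.length stock.length) ((K - ((pt.length : Nat) : Int)).toNat) with hnJdef
  have hJ : min (min ((stock.reverse.length : Nat) : Int) ((vals.length : Nat) : Int))
      (max (K - ((pt.length : Nat) : Int)) 0) + 1 = ((nJ + 1 : Nat) : Int) := by
    simp only [List.length_reverse, hnJdef]
    omega
  rw [hJ, PySem.List.pyRange_zero_natCast, List.map_map]
  have hmap : (List.range (nJ + 1)).map
      ((fun j => base - PySem.List.pyGetD (stock.foldl (fun (st : List Int × Int) d =>
          (st.1 ++ [st.2 + d], st.2 + d)) ([(0:Int)], (0:Int))).1 j 0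
        + PySem.List.pyGetD (vals.foldl (fun (st : List Int × Int) d =>
          (st.1 ++ [st.2 + d], st.2 + d)) ([(0:Int)], (0:Int))).1 j 0
        + (((pt.length : Nat) : Int) + j) ^ 2) ∘ (fun (k : Nat) => (k : Int))) =
      (List.range (nJ + 1)).map (fun k => base - (stock.take k).sum + (vals.take k).sum
        + (((pt.length : Nat) : Int) + (k : Int)) ^ 2) := by
    refine List.map_congr_left fun k hk => ?_
    have hk1 : k ≤ nJ := Nat.lt_succ_iff.mp (List.mem_range.mp hk)
    have hks : k ≤ stock.length := by omega
    have hkv : k ≤ vals.length := by omega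
    simp only [Function.comp_apply, PySem.List.pyGetD_natCast]
    rw [prefix_fold_getD stock k hks, prefix_fold_getD vals k hkv]
  rw [hmap, List.range_succ_eq_map, List.map_cons, List.map_map, maxOf_cons]
  have htail : (List.range nJ).map ((fun k => base - (stock.take k).sum + (vals.take k).sum
        + (((pt.length : Nat) : Int) + (k : Int)) ^ 2) ∘ Nat.succ) =
      (List.range nJ).map (fun i => base + (vals.take (i + 1)).sum - (stock.take (i + 1)).sum
        + (((pt.length : Nat) : Int) + 1 + (i : Int)) ^ 2) :=
    List.map_congr_left fun i _ => by
      simp only [Function.comp_apply, Nat.succ_eq_add_one]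
      push_cast
      ring
  rw [htail]
  simp only [List.take_zero, List.sum_nil, Nat.cast_zero, add_zero, sub_zero]
  rfl
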